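-- pv_equiv track=rewrite | github.com/vlasovskikh/advent-of-code-2021 | aoc21/p10.py | autocomplete_score
-- ===== SOURCE A (Python) =====
-- def autocomplete_score(completion: str) -> int:
--     scoring = {
--         ")": 1,
--         "]": 2,
--         "}": 3,
--         ">": 4,
--     }
--     s = 0
--     for c in completion:
--         s = s * 5 + scoring[c]
--     return s
-- ===== SOURCE B (Python) =====
-- def autocomplete_score(completion: str) -> int:
--     scoring = {
--         ")": 1,
--         "]": 2,
--         "}": 3,
--         ">": 4,
--     }
--     total = 0
--     for i, c in enumerate(reversed(completion)):
--         total += scoring[c] * 5 ** i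
--     return total
-- ===== Notes on version B (the rewrite author's own statement) =====
-- stated objective: alternative
-- what changed: Replaces the left-to-right Horner multiply-accumulate (s = s*5 + digit) with an explicit base-5 positional sum over the reversed string, adding scoring[c] * 5**i for each position i.
import Mathlib
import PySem

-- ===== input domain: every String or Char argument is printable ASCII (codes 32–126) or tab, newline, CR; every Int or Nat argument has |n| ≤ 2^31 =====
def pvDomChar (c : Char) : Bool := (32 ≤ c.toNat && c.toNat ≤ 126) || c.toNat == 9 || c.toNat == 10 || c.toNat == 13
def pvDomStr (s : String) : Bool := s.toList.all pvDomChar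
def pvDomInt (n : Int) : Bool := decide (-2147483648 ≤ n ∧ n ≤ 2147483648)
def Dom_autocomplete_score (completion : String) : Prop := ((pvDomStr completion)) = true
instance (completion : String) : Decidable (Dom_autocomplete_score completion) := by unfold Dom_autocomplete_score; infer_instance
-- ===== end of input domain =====

-- B replaces A's Horner multiply-accumulate with an explicit base-5 positional sum over the reversed string (alternative decomposition, same cost).

-- ===== PORT A =====
-- the scoring dict of both Pythons
def pvScoring : PySem.Dict Char Int := PySem.Dict.ofList [(')', 1), (']', 2), ('}', 3), ('>', 4)]

-- s = s * 5 + scoring[c]; inside Pre_ the key is present, so getD never takes its default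
def autocomplete_score (completion : String) : Int :=
  completion.toList.foldl (fun s c => s * 5 + pvScoring.getD c 0) 0

-- ===== PORT B =====
-- total += scoring[c] * 5 ** i  over enumerate(reversed(completion))
def autocomplete_score_alt (completion : String) : Int :=
  (PySem.List.enumerate completion.toList.reverse).foldl
    (fun total p => total + pvScoring.getD p.2 0 * 5 ^ p.1.toNat) 0

-- ===== PRECONDITION & SPEC =====
-- Pre_ excludes strings containing a character other than ) ] } >, on which both Pythons raise KeyError.
def Pre_autocomplete_score (completion : String) : Prop :=
  (completion.toList.all (fun c => c == ')' || c == ']' || c == '}' || c == '>')) = true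
instance (completion : String) : Decidable (Pre_autocomplete_score completion) := by
  unfold Pre_autocomplete_score; infer_instance
def pvWitness_autocomplete_score : String := "])}>"

def Spec_autocomplete_score (completion : String) (out : Int) : Prop := out = autocomplete_score_alt completion
instance (completion : String) (out : Int) : Decidable (Spec_autocomplete_score completion out) := by unfold Spec_autocomplete_score; infer_instance

-- ===== CLAIM (what is proved, stated in full; the proofs are below) =====
def Claim_equal_autocomplete_score : Prop := ∀ (completion : String), Dom_autocomplete_score completion → Pre_autocomplete_score completion → Spec_autocomplete_score completion (autocomplete_score completion)

-- ===== LEMMAS AND PROOFS =====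

-- B's fold on a list l (already reversed), abbreviated for the induction
def pvPoly (l : List Char) : Int :=
  (PySem.List.enumerate l).foldl (fun total p => total + pvScoring.getD p.2 0 * 5 ^ p.1.toNat) 0

theorem pvPoly_append_singleton (l : List Char) (c : Char) :
    pvPoly (l ++ [c]) = pvPoly l + pvScoring.getD c 0 * 5 ^ l.length := by
  unfold pvPoly
  rw [PySem.List.enumerate_append, List.foldl_append]
  simp only [PySem.List.enumerate, List.foldl_cons, List.foldl_nil, zero_add]
  simp [Int.toNat_natCast]

theorem pvHorner_eq (l : List Char) (s : Int) :
    l.foldl (fun s c => s * 5 + pvScoring.getD c 0) s = s * 5 ^ l.length + pvPoly l.reverse := by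
  induction l generalizing s with
  | nil => simp [pvPoly]
  | cons c t ih =>
    simp only [List.foldl_cons, List.reverse_cons, ih, pvPoly_append_singleton,
      List.length_reverse, List.length_cons]
    ring

-- ===== VERDICT (by name: the statement is the Claim_ definition above) =====
theorem autocomplete_score_spec : Claim_equal_autocomplete_score := by
  intro completion _ _
  unfold Spec_autocomplete_score autocomplete_score autocomplete_score_alt
  rw [pvHorner_eq]
  simp [pvPoly]
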